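-- pv_equiv track=rewrite | github.com/hasanusama/Spade-Crypto-System | spades_cryptosystem.py | convert_dna_to_int
-- ===== SOURCE A (Python) =====
-- from typing import List, Tuple
--
-- DNA_MAPPING = {
--     "AA": 1, "AC": 2, "AG": 3, "AT": 4,
--     "CA": 5, "CC": 6, "CG": 7, "CT": 8,
--     "GA": 9, "GC": 10, "GG": 11, "GT": 12,
--     "TA": 13, "TC": 14, "TG": 15, "TT": 16
-- }
--
-- def convert_dna_to_int(dna_sequence: str) -> List[int]:
--     data = []
--     for i in range(0, len(dna_sequence) - 1, 2):
--         pair = dna_sequence[i:i+2]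
--         if pair in DNA_MAPPING:
--             data.append(DNA_MAPPING[pair])
--         else:
--             raise ValueError(f"Invalid DNA pair: {pair}")
--     return data
-- ===== SOURCE B (Python) =====
-- def convert_dna_to_int(dna_sequence):
--     base = {'A': 0, 'C': 1, 'G': 2, 'T': 3}
--     data = []
--     it = iter(dna_sequence)
--     for a, b in zip(it, it):
--         v = base.get(a)
--         w = base.get(b)
--         if v is None or w is None:
--             raise ValueError(f"Invalid DNA pair: {a}{b}")
--         data.append(4 * v + w + 1)
--     return data
-- ===== Notes on version B (the rewrite author's own statement) =====
-- stated objective: simpler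
-- what changed: B replaces the 16-entry pair-lookup table and the index/slice loop over range(0, len-1, 2) with a pairwise iterator walk (zip(it, it)) over the characters and a closed-form base-4 value 4*m[a]+m[b]+1 computed from a 4-entry base map.
import Mathlib
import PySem

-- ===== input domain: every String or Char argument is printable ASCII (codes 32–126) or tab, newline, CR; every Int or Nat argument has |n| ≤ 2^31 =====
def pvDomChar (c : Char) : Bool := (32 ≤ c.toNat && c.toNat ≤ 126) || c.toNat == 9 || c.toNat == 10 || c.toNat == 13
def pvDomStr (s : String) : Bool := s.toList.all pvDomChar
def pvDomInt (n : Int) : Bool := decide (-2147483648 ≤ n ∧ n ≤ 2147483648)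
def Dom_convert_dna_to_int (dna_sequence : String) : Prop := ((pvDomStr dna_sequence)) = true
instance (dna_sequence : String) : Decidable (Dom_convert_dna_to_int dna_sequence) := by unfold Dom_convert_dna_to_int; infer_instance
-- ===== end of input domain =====

-- B replaces the 16-entry pair table with a pairwise iterator walk over the characters and a
-- closed-form base-4 value 4*m[a]+m[b]+1 from a 4-entry base map (objective: simpler).

-- ===== PORT A =====
def dnaMapping : PySem.Dict String Int :=
  PySem.Dict.ofList [("AA", 1), ("AC", 2), ("AG", 3), ("AT", 4),
   ("CA", 5), ("CC", 6), ("CG", 7), ("CT", 8),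
   ("GA", 9), ("GC", 10), ("GG", 11), ("GT", 12),
   ("TA", 13), ("TC", 14), ("TG", 15), ("TT", 16)]

-- A's for-loop over range(0, len-1, 2); the `none` branch is Python's `raise ValueError` (excluded by Pre_).
def aLoop (s : String) : List Int → List Int → List Int
  | [], data => data
  | i :: is, data =>
    let pair := PySem.Str.slice s (some i) (some (i + 2))
    if (PySem.Dict.get? dnaMapping pair).isSome then
      aLoop s is (data ++ [(PySem.Dict.get? dnaMapping pair).getD 0])
    else data

def convert_dna_to_int (dna_sequence : String) : List Int :=
  aLoop dna_sequence (PySem.List.pyRange 0 (PySem.Str.len dna_sequence - 1) 2) []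

-- ===== PORT B =====
def baseMap : PySem.Dict Char Int := PySem.Dict.ofList [('A', 0), ('C', 1), ('G', 2), ('T', 3)]

-- B's `for a, b in zip(it, it)` pairwise walk; the `_, _` fallthrough is the `raise` (excluded by Pre_).
def bLoop : List Char → List Int
  | a :: b :: rest =>
    match PySem.Dict.get? baseMap a, PySem.Dict.get? baseMap b with
    | some v, some w => (4 * v + w + 1) :: bLoop rest
    | _, _ => []
  | _ => []

def convert_dna_to_int_alt (dna_sequence : String) : List Int :=
  bLoop dna_sequence.toList

-- ===== PRECONDITION & SPEC =====
def dnaBase (c : Char) : Bool := c == 'A' || c == 'C' || c == 'G' || c == 'T'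

-- Pre_: every character that belongs to a complete pair is one of A/C/G/T — exactly the inputs
-- on which Python A returns instead of raising ValueError.
def Pre_convert_dna_to_int (dna_sequence : String) : Prop :=
  (dna_sequence.toList.take (2 * (dna_sequence.toList.length / 2))).all dnaBase = true
instance (dna_sequence : String) : Decidable (Pre_convert_dna_to_int dna_sequence) := by
  unfold Pre_convert_dna_to_int; infer_instance

def pvWitness_convert_dna_to_int : String := "ACGTA"

def Spec_convert_dna_to_int (dna_sequence : String) (out : List Int) : Prop := out = convert_dna_to_int_alt dna_sequence
instance (dna_sequence : String) (out : List Int) : Decidable (Spec_convert_dna_to_int dna_sequence out) := by unfold Spec_convert_dna_to_int; infer_instance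

-- ===== CLAIM (what is proved, stated in full; the proofs are below) =====
def Claim_equal_convert_dna_to_int : Prop := ∀ (dna_sequence : String), Dom_convert_dna_to_int dna_sequence → Pre_convert_dna_to_int dna_sequence → Spec_convert_dna_to_int dna_sequence (convert_dna_to_int dna_sequence)

-- ===== LEMMAS AND PROOFS =====

theorem pvWitness_ok : Dom_convert_dna_to_int pvWitness_convert_dna_to_int ∧
    Pre_convert_dna_to_int pvWitness_convert_dna_to_int := by decide

theorem pyRange_two_nil (a b : Int) (h : b ≤ a) : PySem.List.pyRange a b 2 = [] := by
  rw [PySem.List.pyRange_of_pos _ _ (by norm_num : (0:Int) < 2)]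
  simp [show ¬ a < b by omega]

theorem pyRange_two_cons (a b : Int) (h : a < b) :
    PySem.List.pyRange a b 2 = a :: PySem.List.pyRange (a + 2) b 2 := by
  rw [PySem.List.pyRange_of_pos _ _ (by norm_num : (0:Int) < 2),
      PySem.List.pyRange_of_pos _ _ (by norm_num : (0:Int) < 2)]
  by_cases h2 : a + 2 < b
  · rw [if_pos h, if_pos h2,
      show ((b - a + 2 - 1) / 2).toNat = ((b - (a + 2) + 2 - 1) / 2).toNat + 1 by omega,
      List.range_succ_eq_map]
    simp only [List.map_cons, List.map_map, Nat.cast_zero, mul_zero, add_zero]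
    refine congrArg _ (List.map_congr_left fun k _ => ?_)
    simp [Function.comp]; ring
  · rw [if_pos h, if_neg h2, show ((b - a + 2 - 1) / 2).toNat = 1 by omega]
    simp

-- a valid base has a value in B's 4-entry map
theorem baseMap_isSome (c : Char) (h : dnaBase c = true) :
    (PySem.Dict.get? baseMap c).isSome := by
  simp [dnaBase] at h
  rcases h with ((rfl | rfl) | rfl) | rfl <;> decide

-- A's 16-entry pair lookup IS B's closed-form base-4 value
theorem dict_eq_arith (a b : Char) (ha : dnaBase a = true) (hb : dnaBase b = true) :
    PySem.Dict.get? dnaMapping (String.ofList [a, b]) =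
      some (4 * (PySem.Dict.get? baseMap a).getD 0 + (PySem.Dict.get? baseMap b).getD 0 + 1) := by
  simp [dnaBase] at ha hb
  rcases ha with ((rfl | rfl) | rfl) | rfl <;> rcases hb with ((rfl | rfl) | rfl) | rfl <;> decide

theorem aLoop_eq (fuel : Nat) : ∀ (cs : List Char) (s : String) (k : Nat) (acc : List Int),
    cs.length ≤ fuel →
    s.toList.drop (2 * k) = cs →
    (cs.take (2 * (cs.length / 2))).all dnaBase = true →
    aLoop s (PySem.List.pyRange (2 * k) (PySem.Str.len s - 1) 2) acc = acc ++ bLoop cs := by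
  induction fuel with
  | zero =>
    intro cs s k acc hf hdrop _
    have hcs : cs = [] := List.length_eq_zero_iff.mp (Nat.le_zero.mp hf)
    subst hcs
    have hlen : s.toList.length <= 2 * k := by
      have := congrArg List.length hdrop
      simp only [List.length_drop, List.length_nil] at this; omega
    have h2 : PySem.Str.len s - 1 <= 2 * (k : Int) := by rw [PySem.Str.len_eq]; omega
    rw [pyRange_two_nil _ _ h2]
    simp [aLoop, bLoop]
  | succ f ih =>
    intro cs s k acc hf hdrop hall
    match cs with
    | [] =>
      have hlen : s.toList.length <= 2 * k := by
        have := congrArg List.length hdrop; simp only [List.length_drop, List.length_nil] at this; omega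
      have h2 : PySem.Str.len s - 1 <= 2 * (k : Int) := by rw [PySem.Str.len_eq]; omega
      rw [pyRange_two_nil _ _ h2]
      simp [aLoop, bLoop]
    | [a] =>
      have hlen : s.toList.length = 2 * k + 1 := by
        have := congrArg List.length hdrop; simp only [List.length_drop, List.length_cons, List.length_nil] at this; omega
      have h2 : PySem.Str.len s - 1 <= 2 * (k : Int) := by rw [PySem.Str.len_eq]; omega
      rw [pyRange_two_nil _ _ h2]
      simp [aLoop, bLoop]
    | a :: b :: rest =>
      have hlen : s.toList.length = 2 * k + 2 + rest.length := by
        have := congrArg List.length hdrop; simp only [List.length_drop, List.length_cons] at this; omega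
      rw [show 2 * ((a :: b :: rest).length / 2) = 2 * (rest.length / 2) + 1 + 1 by
        simp; omega] at hall
      simp only [List.take_succ_cons, List.all_cons, Bool.and_eq_true] at hall
      obtain ⟨ha, hb, hrest⟩ := hall
      obtain ⟨va, hva⟩ := Option.isSome_iff_exists.mp (baseMap_isSome a ha)
      obtain ⟨vb, hvb⟩ := Option.isSome_iff_exists.mp (baseMap_isSome b hb)
      have hpair : PySem.Str.slice s (some (2 * (k : Int))) (some (2 * (k : Int) + 2)) =
          String.ofList [a, b] := by
        rw [show (2 * (k : Int)) = ((2 * k : Nat) : Int) by push_cast; ring]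
        rw [show ((2 * k : Nat) : Int) + 2 = ((2 * k : Nat) : Int) + ((2 : Nat) : Int) by norm_num]
        rw [PySem.Str.slice, PySem.Chars.slice, PySem.List.slice_natCast_add, hdrop]
        rfl
      have hget : PySem.Dict.get? dnaMapping (String.ofList [a, b]) = some (4 * va + vb + 1) := by
        rw [dict_eq_arith a b ha hb, hva, hvb]; rfl
      have hlt : 2 * (k : Int) < PySem.Str.len s - 1 := by rw [PySem.Str.len_eq]; omega
      rw [pyRange_two_cons _ _ hlt]
      simp only [aLoop, hpair, hget, Option.isSome_some, if_true, Option.getD_some]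
      have hdrop2 : s.toList.drop (2 * (k + 1)) = rest := by
        rw [show 2 * (k + 1) = 2 * k + 2 by ring, ← List.drop_drop, hdrop]
        rfl
      have hih := ih rest s (k + 1) (acc ++ [4 * va + vb + 1]) (by simp at hf; omega) hdrop2 hrest
      rw [show (2 * (k : Int)) + 2 = 2 * ((k + 1 : Nat) : Int) by push_cast; ring, hih]
      simp [bLoop, hva, hvb]

-- ===== VERDICT (by name: the statement is the Claim_ definition above) =====
theorem convert_dna_to_int_spec : Claim_equal_convert_dna_to_int := by
  intro s _hdom hpre
  unfold Spec_convert_dna_to_int convert_dna_to_int convert_dna_to_int_alt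
  have := aLoop_eq s.toList.length s.toList s 0 [] le_rfl (by simp) hpre
  simpa using this
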